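-- pv_equiv track=rewrite | github.com/schefflerjens/shadow-falls | workflow.py | last_sentences
-- ===== SOURCE A (Python) =====
-- def last_sentences(s: str, i: int) -> str:
--     """Find the last i sentences in a string str"""
--     end = len(s)
--     if s[end - 1] == '.':
--         # Ignore the period of the last sentence
--         end -= 1
--     for _ in range(i):
--         idx = s.rfind('.', 0, end)
--         if idx >= 0:
--             end = idx
--         if idx <= 0:
--             break
--     return s[(end + 1):].strip()
-- ===== SOURCE B (Python) =====
-- def last_sentences(s: str, i: int) -> str:
--     """Find the last i sentences in a string str"""
--     end = len(s)
--     if s[end - 1] == '.':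
--         end -= 1
--     # one forward pass: all period positions before the effective end
--     periods = [j for j in range(end) if s[j] == '.']
--     if i > 0:
--         k = i
--         for p in reversed(periods):
--             end = p
--             k -= 1
--             if p == 0 or k == 0:
--                 break
--     return s[end + 1:].strip()
-- ===== Notes on version B (the rewrite author's own statement) =====
-- stated objective: alternative
-- what changed: A repeatedly calls s.rfind('.') shrinking the search window up to i times; B makes one forward pass collecting all period positions and then walks that list backwards with a counter.
import Mathlib
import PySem

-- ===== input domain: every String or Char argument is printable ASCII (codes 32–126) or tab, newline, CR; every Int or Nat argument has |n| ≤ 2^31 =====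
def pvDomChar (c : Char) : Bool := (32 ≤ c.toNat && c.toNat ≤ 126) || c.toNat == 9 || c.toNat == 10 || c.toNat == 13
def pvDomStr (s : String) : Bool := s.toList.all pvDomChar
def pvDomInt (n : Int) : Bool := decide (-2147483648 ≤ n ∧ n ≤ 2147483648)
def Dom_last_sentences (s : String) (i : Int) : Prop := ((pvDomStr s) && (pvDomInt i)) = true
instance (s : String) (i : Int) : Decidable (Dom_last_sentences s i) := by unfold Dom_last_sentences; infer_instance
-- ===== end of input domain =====

-- B replaces A's repeated rfind-and-shrink loop by one forward pass collecting all
-- period positions, then a single reverse walk with a counter (objective: alternative).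

-- ===== PORT A =====
-- the 'for _ in range(i)' loop of A, with its break; fuel = number of remaining iterations
def lsLoopA (s : String) : Int → Nat → Int
  | e, 0 => e
  | e, n + 1 =>
    let idx := PySem.Str.rfindFrom s "." 0 (some e)
    let e' := if idx ≥ 0 then idx else e
    if idx ≤ 0 then e' else lsLoopA s e' n

def last_sentences (s : String) (i : Int) : String :=
  let e0 : Int := PySem.Str.len s
  match PySem.Str.pyGet? s (e0 - 1) with
  | none => ""   -- IndexError on the empty string; excluded by Pre_
  | some c =>
    let e1 := if c = '.' then e0 - 1 else e0
    let e2 := lsLoopA s e1 i.toNat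
    PySem.Str.strip (PySem.Str.slice s (some (e2 + 1)) none)

-- ===== PORT B =====
-- the comprehension [j for j in range(end) if s[j] == '.']
def lsPeriods (cs : List Char) (e : Nat) : List Nat :=
  (List.range e).filter (fun j => cs[j]? == some '.')

-- the 'for p in reversed(periods)' loop of B, with its counter and break
def lsWalkB : List Nat → Int → Int → Int
  | [], e, _ => e
  | p :: rest, _, k => if p = 0 ∨ k - 1 = 0 then (p : Int) else lsWalkB rest p (k - 1)

def last_sentences_alt (s : String) (i : Int) : String :=
  let e0 : Int := PySem.Str.len s
  match PySem.Str.pyGet? s (e0 - 1) with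
  | none => ""   -- IndexError on the empty string; excluded by Pre_
  | some c =>
    let e1 := if c = '.' then e0 - 1 else e0
    let periods := lsPeriods s.toList e1.toNat
    let e2 := if i > 0 then lsWalkB periods.reverse e1 i else e1
    PySem.Str.strip (PySem.Str.slice s (some (e2 + 1)) none)

-- ===== PRECONDITION & SPEC =====
-- A raises IndexError (s[end-1] with end = 0) on the empty string; excluded.
def Pre_last_sentences (s : String) (i : Int) : Prop := s ≠ ""
instance (s : String) (i : Int) : Decidable (Pre_last_sentences s i) := by
  unfold Pre_last_sentences; infer_instance

def pvWitness_last_sentences : String × Int := ("One. Two. Three.", 2)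

def Spec_last_sentences (s : String) (i : Int) (out : String) : Prop := out = last_sentences_alt s i
instance (s : String) (i : Int) (out : String) : Decidable (Spec_last_sentences s i out) := by
  unfold Spec_last_sentences; infer_instance

-- ===== CLAIM (what is proved, stated in full; the proofs are below) =====
def Claim_equal_last_sentences : Prop := ∀ (s : String) (i : Int), Dom_last_sentences s i → Pre_last_sentences s i → Spec_last_sentences s i (last_sentences s i)

-- ===== LEMMAS AND PROOFS =====

theorem lsPeriods_succ (cs : List Char) (e : Nat) :
    lsPeriods cs (e + 1) =
      lsPeriods cs e ++ (if cs[e]? = some '.' then [e] else []) := by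
  by_cases h : cs[e]? = some '.' <;> simp [lsPeriods, List.range_succ, h]

theorem lsPeriods_step (cs : List Char) :
    ∀ (e : Nat) (p : Nat) (t : List Nat), (lsPeriods cs e).reverse = p :: t →
      p < e ∧ cs[p]? = some '.' ∧ t = (lsPeriods cs p).reverse := by
  intro e
  induction e with
  | zero => intro p t h; simp [lsPeriods] at h
  | succ e ih =>
    intro p t h
    rw [lsPeriods_succ] at h
    by_cases hc : cs[e]? = some '.'
    · rw [if_pos hc, List.reverse_append] at h
      simp only [List.reverse_singleton, List.singleton_append, List.cons.injEq] at h
      obtain ⟨hp, ht⟩ := h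
      subst hp; subst ht
      exact ⟨Nat.lt_succ_self e, hc, rfl⟩
    · rw [if_neg hc, List.append_nil] at h
      obtain ⟨hlt, hpe, hteq⟩ := ih p t h
      exact ⟨Nat.lt_succ_of_lt hlt, hpe, hteq⟩

theorem isPrefixOf_dot (cs : List Char) :
    (['.'].isPrefixOf cs) = (cs[0]? == some '.') := by
  cases cs with
  | nil => simp [List.isPrefixOf]
  | cons c t => simp [List.isPrefixOf, BEq.comm]

theorem rfind_go_dot (cs : List Char) :
    ∀ k : Nat, PySem.Chars.rfind.go cs ['.'] k =
      (match (lsPeriods cs (k + 1)).reverse with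
       | [] => (-1 : Int)
       | p :: _ => (p : Int)) := by
  intro k
  induction k with
  | zero =>
    rw [PySem.Chars.rfind.go, isPrefixOf_dot]
    rw [lsPeriods_succ]
    by_cases h : cs[0]? = some '.' <;> simp [h, lsPeriods]
  | succ k ih =>
    rw [PySem.Chars.rfind.go, isPrefixOf_dot]
    have hd : (cs.drop (k + 1))[0]? = cs[k + 1]? := by
      simpa using List.getElem?_drop cs (k + 1) 0
    rw [hd, lsPeriods_succ cs (k + 1)]
    by_cases h : cs[k + 1]? = some '.' <;> simp [h, ih]

theorem lsPeriods_len_succ (cs : List Char) :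
    lsPeriods cs (cs.length + 1) = lsPeriods cs cs.length := by
  rw [lsPeriods_succ]; simp

theorem lsPeriods_take (cs : List Char) (e : Nat) (he : e ≤ cs.length) :
    lsPeriods (cs.take e) e = lsPeriods cs e := by
  unfold lsPeriods
  apply List.filter_congr
  intro j hj
  rw [List.mem_range] at hj
  rw [List.getElem?_take_of_lt hj]

theorem rfindFrom_dot (s : String) (e : Nat) (he : e ≤ s.toList.length) :
    PySem.Str.rfindFrom s "." 0 (some (e : Int)) =
      (match (lsPeriods s.toList e).reverse with
       | [] => (-1 : Int)
       | p :: _ => (p : Int)) := by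
  have h1 : PySem.Str.rfindFrom s "." 0 (some (e : Int)) =
      PySem.Chars.rfindFrom s.toList ['.'] 0 (some (e : Int)) := by
    simp [PySem.Str.rfindFrom_eq]
  rw [h1]
  unfold PySem.Chars.rfindFrom
  have hne : ¬ ((s.toList.length : Int) < (e : Int)) := by exact_mod_cast Nat.not_lt.mpr he
  have hnneg : ¬ ((e : Int) < 0) := by omega
  simp only [hne, if_false, hnneg]
  norm_num
  have hlen : (s.toList.take e).length = e := by
    rw [List.length_take]; exact Nat.min_eq_left he
  have hr : PySem.Chars.rfind (s.toList.take e) ['.'] =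
      (match (lsPeriods s.toList e).reverse with
       | [] => (-1 : Int)
       | p :: _ => (p : Int)) := by
    unfold PySem.Chars.rfind
    rw [hlen]
    cases e with
    | zero => simp [PySem.Chars.rfind.go, List.isPrefixOf, lsPeriods]
    | succ m =>
      rw [rfind_go_dot]
      have : lsPeriods (s.toList.take (m + 1)) (m + 1 + 1) =
          lsPeriods s.toList (m + 1) := by
        rw [show m + 1 + 1 = (s.toList.take (m+1)).length + 1 by rw [hlen]]
        rw [lsPeriods_len_succ, hlen]
        exact lsPeriods_take s.toList (m + 1) he
      rw [this]
  rw [hr]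
  cases hM : (lsPeriods s.toList e).reverse with
  | nil => simp
  | cons p t => simp

-- the main invariant: A's rfind loop walks exactly the reversed period list
theorem loop_eq_walk (s : String) :
    ∀ (n : Nat) (e : Nat), e ≤ s.toList.length →
      lsLoopA s (e : Int) (n + 1) = lsWalkB (lsPeriods s.toList e).reverse (e : Int) ((n : Int) + 1) := by
  intro n
  induction n with
  | zero =>
    intro e he
    rw [lsLoopA]
    simp only [rfindFrom_dot s e he]
    cases hM : (lsPeriods s.toList e).reverse with
    | nil => simp [lsWalkB, lsLoopA]
    | cons p t =>
      by_cases hp : p = 0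
      · subst hp; simp [lsWalkB, lsLoopA]
      · have hpos : (0 : Int) < (p : Int) := by exact_mod_cast Nat.pos_of_ne_zero hp
        simp only [lsWalkB, lsLoopA]
        have h1 : ((p : Int) ≥ 0) := le_of_lt hpos
        have h2 : ¬ ((p : Int) ≤ 0) := not_le.mpr hpos
        simp [h1, h2, hp, lsLoopA]
  | succ n ih =>
    intro e he
    rw [lsLoopA]
    simp only [rfindFrom_dot s e he]
    cases hM : (lsPeriods s.toList e).reverse with
    | nil => simp [lsWalkB, lsLoopA]
    | cons p t =>
      obtain ⟨hlt, hpe, hteq⟩ := lsPeriods_step s.toList e p t hM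
      by_cases hp : p = 0
      · subst hp; simp [lsWalkB, lsLoopA]
      · have hpos : (0 : Int) < (p : Int) := by exact_mod_cast Nat.pos_of_ne_zero hp
        have h1 : ((p : Int) ≥ 0) := le_of_lt hpos
        have h2 : ¬ ((p : Int) ≤ 0) := not_le.mpr hpos
        have hple : p ≤ s.toList.length := le_trans (le_of_lt hlt) he
        have harith : (((n + 1 : Nat) : Int)) + 1 - 1 = (n : Int) + 1 := by push_cast; ring
        have hcond : ¬ (p = 0 ∨ (n : Int) + 1 = 0) := by push_neg; exact ⟨hp, by omega⟩
        simp only [lsWalkB, h1, h2, if_true, if_false, ite_true, ite_false, harith]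
        rw [if_neg hcond, hteq]
        exact ih p hple

-- ===== VERDICT (by name: the statement is the Claim_ definition above) =====
theorem last_sentences_spec : Claim_equal_last_sentences := by
  intro s i _ hpre
  unfold Spec_last_sentences last_sentences last_sentences_alt
  simp only [PySem.Str.pyGet?_eq, PySem.Str.len_eq]
  have hnil : s.toList ≠ [] := fun hs => hpre (String.toList_eq_nil_iff.mp hs)
  have hlen : 0 < s.toList.length := List.length_pos_iff.mpr hnil
  cases h : PySem.Chars.pyGet? s.toList ((s.toList.length : Int) - 1) with
  | none => rfl
  | some c =>
    dsimp only
    set e1 : Int := if c = '.' then (s.toList.length : Int) - 1 else (s.toList.length : Int) with he1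
    have he1b : 0 ≤ e1 ∧ e1 ≤ (s.toList.length : Int) := by
      rw [he1]; split_ifs <;> constructor <;> omega
    have hcast : ((e1.toNat : Nat) : Int) = e1 := Int.toNat_of_nonneg he1b.1
    have heN : e1.toNat ≤ s.toList.length := by omega
    have key : lsLoopA s e1 i.toNat =
        (if i > 0 then lsWalkB (lsPeriods s.toList e1.toNat).reverse e1 i else e1) := by
      by_cases hi : i > 0
      · rw [if_pos hi]
        have hn : i.toNat = (i.toNat - 1) + 1 := by omega
        have hicast : (((i.toNat - 1 : Nat) : Int) + 1) = i := by omega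
        calc lsLoopA s e1 i.toNat
            = lsLoopA s ((e1.toNat : Nat) : Int) ((i.toNat - 1) + 1) := by rw [hcast, ← hn]
          _ = lsWalkB (lsPeriods s.toList e1.toNat).reverse ((e1.toNat : Nat) : Int)
                (((i.toNat - 1 : Nat) : Int) + 1) := loop_eq_walk s (i.toNat - 1) e1.toNat heN
          _ = lsWalkB (lsPeriods s.toList e1.toNat).reverse e1 i := by rw [hcast, hicast]
      · rw [if_neg hi]
        have hn : i.toNat = 0 := by omega
        rw [hn, lsLoopA]
    rw [key]
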